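-- pv_equiv track=rewrite | github.com/mnbplus/PyAegis | pyaegis/core/taint.py | _is_test_filepath
-- ===== SOURCE A (Python) =====
-- def _is_test_filepath(filepath: str) -> bool:
--     """Return True if the filepath looks like a test file."""
--     # Normalize separators
--     normalized = filepath.replace("\\", "/")
--     # Check directory components
--     parts = normalized.split("/")
--     for part in parts[:-1]:
--         if part in ("tests", "testing", "test"):
--             return True
--     # Check filename
--     filename = parts[-1]
--     if filename.startswith("test_") or filename.endswith("_test.py"):
--         return True
--     return False
-- ===== SOURCE B (Python) =====
-- def _is_test_filepath(filepath: str) -> bool: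
--     """Return True if the filepath looks like a test file."""
--     normalized = filepath.replace("\\", "/")
--     i = normalized.rfind("/")
--     # Directory part with sentinel slashes: each component appears as "/<comp>/"
--     dirs = "/" + normalized[:i + 1]
--     if "/tests/" in dirs or "/testing/" in dirs or "/test/" in dirs:
--         return True
--     filename = normalized[i + 1:]
--     return filename.startswith("test_") or filename.endswith("_test.py")
-- ===== Notes on version B (the rewrite author's own statement) =====
-- stated objective: alternative
-- what changed: Instead of splitting the path into a parts list and looping over the directory components, B finds the last slash with one rfind and tests the three directory names as slash-delimited substrings ('/tests/', '/testing/', '/test/') of the sentinel-wrapped directory prefix, then checks the filename slice directly.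
import Mathlib
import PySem

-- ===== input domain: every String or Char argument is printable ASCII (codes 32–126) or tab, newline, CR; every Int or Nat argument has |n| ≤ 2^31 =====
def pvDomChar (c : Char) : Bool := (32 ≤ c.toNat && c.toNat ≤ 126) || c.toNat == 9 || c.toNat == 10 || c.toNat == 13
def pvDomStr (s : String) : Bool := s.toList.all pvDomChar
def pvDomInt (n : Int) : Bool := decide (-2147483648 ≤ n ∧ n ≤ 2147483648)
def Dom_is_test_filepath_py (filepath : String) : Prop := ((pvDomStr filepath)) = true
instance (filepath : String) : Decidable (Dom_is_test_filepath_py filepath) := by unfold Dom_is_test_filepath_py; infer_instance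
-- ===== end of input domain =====

-- B replaces A's split-into-parts + component loop by one rfind and three substring
-- searches over the slash-delimited directory prefix (objective: alternative).

-- ===== PORT A =====
def is_test_filepath_py (filepath : String) : Bool :=
  -- normalized = filepath.replace("\\", "/")
  let normalized := PySem.Chars.replace filepath.toList "\\".toList "/".toList
  -- parts = normalized.split("/")
  let parts := PySem.Chars.splitOn normalized "/".toList
  -- for part in parts[:-1]: if part in ("tests", "testing", "test"): return True
  if (PySem.List.slice parts none (some (-1))).any
      (fun part => part == "tests".toList || part == "testing".toList || part == "test".toList) then true
  else
    -- filename = parts[-1]   (str.split never returns an empty list, so the index succeeds)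
    let filename := (PySem.List.pyGet? parts (-1)).getD []
    if PySem.Chars.startswith filename "test_".toList || PySem.Chars.endswith filename "_test.py".toList then
      true
    else
      false

-- ===== PORT B =====
def is_test_filepath_py_alt (filepath : String) : Bool :=
  -- normalized = filepath.replace("\\", "/")
  let normalized := PySem.Chars.replace filepath.toList "\\".toList "/".toList
  -- i = normalized.rfind("/")
  let i := PySem.Chars.rfind normalized "/".toList
  -- dirs = "/" + normalized[:i + 1]
  let dirs := "/".toList ++ PySem.Chars.slice normalized none (some (i + 1))
  if PySem.Chars.isIn "/tests/".toList dirs || PySem.Chars.isIn "/testing/".toList dirs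
      || PySem.Chars.isIn "/test/".toList dirs then
    true
  else
    -- filename = normalized[i + 1:]
    let filename := PySem.Chars.slice normalized (some (i + 1)) none
    PySem.Chars.startswith filename "test_".toList || PySem.Chars.endswith filename "_test.py".toList

-- ===== PRECONDITION & SPEC =====
def Spec_is_test_filepath_py (filepath : String) (out : Bool) : Prop := out = is_test_filepath_py_alt filepath
instance (filepath : String) (out : Bool) : Decidable (Spec_is_test_filepath_py filepath out) := by unfold Spec_is_test_filepath_py; infer_instance

-- ===== CLAIM (what is proved, stated in full; the proofs are below) =====
def Claim_equal_is_test_filepath_py : Prop := ∀ (filepath : String), Dom_is_test_filepath_py filepath → Spec_is_test_filepath_py filepath (is_test_filepath_py filepath)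

-- ===== LEMMAS AND PROOFS =====

-- Reference version of str.split(sep) for the one-character separator '/'.
def mySplit : List Char → List (List Char)
  | [] => [[]]
  | c :: r => if c = '/' then [] :: mySplit r else (mySplit r).modifyHead (c :: ·)

theorem mySplit_ne_nil : ∀ cs : List Char, mySplit cs ≠ [] := by
  intro cs
  cases cs with
  | nil => simp [mySplit]
  | cons c r =>
    simp only [mySplit]
    split
    · simp
    · cases h : mySplit r with
      | nil => exact absurd h (mySplit_ne_nil r)
      | cons p ps => simp

theorem splitOn_go_eq : ∀ (fuel : Nat) (l cur : List Char) (acc : List (List Char)),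
    l.length ≤ fuel →
    PySem.Chars.splitOn.go ['/'] fuel l cur acc
      = acc.reverse ++ (mySplit l).modifyHead (cur.reverse ++ ·) := by
  intro fuel
  induction fuel with
  | zero =>
    intro l cur acc hl
    have : l = [] := by cases l <;> simp_all
    subst this
    rw [PySem.Chars.splitOn.go.eq_def]
    simp [mySplit]
  | succ fuel ih =>
    intro l cur acc hl
    cases l with
    | nil =>
      rw [PySem.Chars.splitOn.go.eq_def]
      simp [mySplit]
    | cons c rest =>
      rw [PySem.Chars.splitOn.go.eq_def]
      simp only [List.isPrefixOf, Bool.and_true]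
      by_cases hc : c = '/'
      · subst hc
        simp only [beq_self_eq_true, if_pos]
        rw [show List.drop (['/'] : List Char).length ('/' :: rest) = rest from rfl]
        rw [ih rest [] _ (by simpa using hl)]
        simp only [mySplit, List.reverse_cons, List.nil_append, List.append_assoc,
          List.cons_append]
        cases mySplit rest <;> simp
      · have hbeq : (('/' : Char) == c) = false := by simp; exact fun h => hc h.symm
        rw [hbeq]
        simp only [Bool.false_eq_true, if_false]
        rw [ih rest (c :: cur) acc (by simpa using hl)]
        simp only [mySplit, if_neg hc]
        cases h : mySplit rest with
        | nil => exact absurd h (mySplit_ne_nil rest)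
        | cons p ps => simp

theorem splitOn_eq_mySplit (cs : List Char) :
    PySem.Chars.splitOn cs ['/'] = mySplit cs := by
  unfold PySem.Chars.splitOn
  rw [splitOn_go_eq (cs.length + 1) cs [] [] (by omega)]
  cases h : mySplit cs with
  | nil => exact absurd h (mySplit_ne_nil cs)
  | cons p ps => simp

theorem mySplit_no_slash : ∀ a : List Char, '/' ∉ a → mySplit a = [a] := by
  intro a
  induction a with
  | nil => intro _; rfl
  | cons c r ih =>
    intro h
    have hc : c ≠ '/' := fun hc => h (hc ▸ List.mem_cons_self)
    have hr : '/' ∉ r := fun hm => h (List.mem_cons_of_mem _ hm)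
    simp [mySplit, hc, ih hr]

theorem mySplit_append : ∀ x y : List Char, mySplit (x ++ '/' :: y) = mySplit x ++ mySplit y := by
  intro x y
  induction x with
  | nil => simp [mySplit]
  | cons c x' ih =>
    by_cases hc : c = '/'
    · subst hc; simp [mySplit, ih]
    · simp only [List.cons_append, mySplit, if_neg hc, ih]
      cases h : mySplit x' with
      | nil => exact absurd h (mySplit_ne_nil x')
      | cons p ps => simp

-- a '/'-free pattern followed by '/' matching at the front pins down the first component
theorem prefix_pins (t : List Char) : ∀ (u v : List Char), '/' ∉ t → '/' ∉ u →
    t ++ ['/'] <+: u ++ '/' :: v → t = u := by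
  induction t with
  | nil =>
    intro u v _ hu h
    cases u with
    | nil => rfl
    | cons c u' =>
      rw [List.nil_append, List.cons_append, List.cons_prefix_cons] at h
      exact absurd h.1.symm (fun hc => hu (hc ▸ List.mem_cons_self))
  | cons x t' ih =>
    intro u v ht hu h
    cases u with
    | nil =>
      rw [List.nil_append, List.cons_append, List.cons_prefix_cons] at h
      exact absurd h.1 (fun hc => ht (hc ▸ List.mem_cons_self))
    | cons c u' =>
      rw [List.cons_append, List.cons_append, List.cons_prefix_cons] at h
      have ht' : '/' ∉ t' := fun hm => ht (List.mem_cons_of_mem _ hm)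
      have hu' : '/' ∉ u' := fun hm => hu (List.mem_cons_of_mem _ hm)
      rw [h.1, ih u' v ht' hu' h.2]

-- the pattern needs two slashes, a '/'-free word plus one trailing slash has only one
theorem no_match_tail (t : List Char) : ∀ u : List Char, '/' ∉ u →
    ¬ ('/' :: (t ++ ['/']) <:+: u ++ ['/']) := by
  intro u
  induction u with
  | nil =>
    intro _ h
    have := h.length_le
    simp at this
  | cons c u' ih =>
    intro hu h
    rcases List.infix_cons_iff.mp h with h | h
    · rw [List.cons_prefix_cons] at h
      exact hu (h.1 ▸ List.mem_cons_self)
    · exact ih (fun hm => hu (List.mem_cons_of_mem _ hm)) h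

theorem skip_first (t v : List Char) : ∀ u : List Char, '/' ∉ u →
    ('/' :: (t ++ ['/']) <:+: u ++ '/' :: (v ++ ['/'])) →
    ('/' :: (t ++ ['/']) <:+: '/' :: (v ++ ['/'])) := by
  intro u
  induction u with
  | nil => intro _ h; simpa using h
  | cons c u' ih =>
    intro hu h
    rcases List.infix_cons_iff.mp h with h | h
    · rw [List.cons_prefix_cons] at h
      exact absurd (h.1 ▸ List.mem_cons_self) hu
    · exact ih (fun hm => hu (List.mem_cons_of_mem _ hm)) h

-- the heart: "/t/" occurs in "/" ++ a ++ "/" exactly when t is a component of a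
theorem infix_iff_component (t : List Char) (ht : '/' ∉ t) :
    ∀ a : List Char, (('/' :: (t ++ ['/'])) <:+: ('/' :: (a ++ ['/'])) ↔ t ∈ mySplit a) := by
  intro a
  induction hn : a.length using Nat.strong_induction_on generalizing a with
  | _ n ih =>
  subst hn
  by_cases hs : '/' ∈ a
  · -- split off the first component: a = u ++ '/' :: v with '/' ∉ u
    have hdw : a.dropWhile (· ≠ '/') ≠ [] := by
      intro hnil
      rw [List.dropWhile_eq_nil_iff] at hnil
      have := hnil '/' hs
      simp at this
    obtain ⟨c, w, hw⟩ := List.exists_cons_of_ne_nil hdw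
    have hc : c = '/' := by
      have := List.head_dropWhile_not (fun x => decide (x ≠ '/')) hdw
      simp only [hw, List.head_cons] at this
      simpa using this
    subst hc
    have hsplit : a.takeWhile (· ≠ '/') ++ '/' :: w = a := by
      rw [← hw]; exact List.takeWhile_append_dropWhile
    set u := a.takeWhile (· ≠ '/') with hu_def
    have hu : '/' ∉ u := by
      intro hm
      have := List.mem_takeWhile_imp hm
      simp at this
    have hlen : w.length < a.length := by
      rw [← hsplit]; simp; omega
    rw [← hsplit, mySplit_append, mySplit_no_slash u hu, List.singleton_append, List.mem_cons]
    constructor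
    · intro h
      rw [List.append_assoc, List.cons_append] at h
      rcases List.infix_cons_iff.mp h with h | h
      · rw [List.cons_prefix_cons] at h
        exact Or.inl (prefix_pins t u (w ++ ['/']) ht hu h.2)
      · refine Or.inr ?_
        rw [← ih w.length hlen w rfl]
        exact skip_first t w u hu h
    · intro h
      rcases h with h | h
      · rw [h, List.append_assoc, List.cons_append]
        refine List.IsPrefix.isInfix ?_
        rw [List.cons_prefix_cons]
        refine ⟨rfl, ?_⟩
        have huw : u ++ '/' :: (w ++ ['/']) = (u ++ ['/']) ++ (w ++ ['/']) := by simp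
        rw [huw]
        exact List.prefix_append _ _
      · have h2 := (ih w.length hlen w rfl).mpr h
        refine List.IsInfix.trans h2 (List.IsSuffix.isInfix ?_)
        rw [List.append_assoc, List.cons_append]
        have : '/' :: (u ++ '/' :: (w ++ ['/'])) = ('/' :: u) ++ '/' :: (w ++ ['/']) := by simp
        rw [this]
        exact List.suffix_append _ _
  · rw [mySplit_no_slash a hs, List.mem_singleton]
    constructor
    · intro h
      rcases List.infix_cons_iff.mp h with h | h
      · rw [List.cons_prefix_cons] at h
        have : a ++ ['/'] = a ++ '/' :: ([] : List Char) := by simp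
        rw [this] at h
        exact prefix_pins t a [] ht hs h.2
      · exact absurd h (no_match_tail t a hs)
    · intro h; subst h; exact List.IsPrefix.isInfix (List.prefix_refl _)

theorem slash_not_prefix {l : List Char} (h : '/' ∉ l) : List.isPrefixOf ['/'] l = false := by
  cases l with
  | nil => rfl
  | cons c r =>
    simp [List.isPrefixOf]
    intro hc
    exact absurd (hc ▸ List.mem_cons_self) h

theorem rfind_go_no_slash {s : List Char} (h : '/' ∉ s) :
    ∀ j : Nat, PySem.Chars.rfind.go s ['/'] j = -1 := by
  intro j
  induction j with
  | zero =>
    rw [PySem.Chars.rfind.go.eq_def]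
    simp [slash_not_prefix h]
  | succ j ih =>
    rw [PySem.Chars.rfind.go.eq_def]
    have : '/' ∉ s.drop (j + 1) := fun hm => h (List.mem_of_mem_drop hm)
    simp [slash_not_prefix this, ih]

theorem rfind_no_slash {s : List Char} (h : '/' ∉ s) :
    PySem.Chars.rfind s ['/'] = -1 := rfind_go_no_slash h s.length

theorem rfind_go_zero (s : List Char) :
    PySem.Chars.rfind.go s ['/'] 0 = if List.isPrefixOf ['/'] s then 0 else -1 := by
  rw [PySem.Chars.rfind.go.eq_def]

theorem rfind_go_succ (s : List Char) (j : Nat) :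
    PySem.Chars.rfind.go s ['/'] (j + 1)
      = if List.isPrefixOf ['/'] (s.drop (j + 1)) then ((j + 1 : Nat) : Int)
        else PySem.Chars.rfind.go s ['/'] j := by
  rw [PySem.Chars.rfind.go.eq_def]

theorem rfind_go_last (a b : List Char) (hb : '/' ∉ b) :
    ∀ n : Nat, PySem.Chars.rfind.go (a ++ '/' :: b) ['/'] (a.length + n) = (a.length : Int) := by
  intro n
  induction n with
  | zero =>
    rw [Nat.add_zero]
    cases ha : a.length with
    | zero =>
      have : a = [] := List.eq_nil_of_length_eq_zero ha
      subst this
      rw [rfind_go_zero]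
      simp [List.isPrefixOf]
    | succ k =>
      rw [rfind_go_succ]
      have hdrop : (a ++ '/' :: b).drop (k + 1) = '/' :: b := by
        rw [← ha]; exact List.drop_left
      rw [hdrop]
      simp [List.isPrefixOf]
  | succ n ih =>
    have harr : a.length + (n + 1) = (a.length + n) + 1 := rfl
    rw [harr, rfind_go_succ]
    have hdrop : (a ++ '/' :: b).drop (a.length + n + 1) = b.drop n := by
      have h1 : a.length + n + 1 = a.length + (n + 1) := by omega
      rw [h1, List.drop_length_add_append (n + 1)]
      rfl
    rw [hdrop, slash_not_prefix (fun hm => hb (List.mem_of_mem_drop hm))]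
    simpa using ih

theorem rfind_last (a b : List Char) (hb : '/' ∉ b) :
    PySem.Chars.rfind (a ++ '/' :: b) ['/'] = (a.length : Int) := by
  unfold PySem.Chars.rfind
  have : (a ++ '/' :: b).length = a.length + (b.length + 1) := by simp
  rw [this]
  exact rfind_go_last a b hb (b.length + 1)

theorem isIn_eq_decide_component (t a : List Char) (ht : '/' ∉ t) :
    PySem.Chars.isIn ('/' :: (t ++ ['/'])) ('/' :: (a ++ ['/'])) = decide (t ∈ mySplit a) := by
  rw [Bool.eq_iff_iff]
  rw [PySem.Chars.isIn_iff_infix, infix_iff_component t ht a]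
  simp

theorem any_three (L : List (List Char)) :
    (L.any (fun part => part == "tests".toList || part == "testing".toList || part == "test".toList))
      = (decide ("tests".toList ∈ L) || decide ("testing".toList ∈ L) || decide ("test".toList ∈ L)) := by
  rw [Bool.eq_iff_iff]
  simp only [List.any_eq_true, Bool.or_eq_true, beq_iff_eq, decide_eq_true_eq]
  constructor
  · rintro ⟨p, hp, (h | h) | h⟩ <;> subst h <;> tauto
  · rintro ((h | h) | h) <;> exact ⟨_, h, by tauto⟩

theorem main_key (cs : List Char) :
    (if (PySem.List.slice (PySem.Chars.splitOn cs "/".toList) none (some (-1))).any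
        (fun part => part == "tests".toList || part == "testing".toList || part == "test".toList) then true
     else
       if PySem.Chars.startswith ((PySem.List.pyGet? (PySem.Chars.splitOn cs "/".toList) (-1)).getD []) "test_".toList
          || PySem.Chars.endswith ((PySem.List.pyGet? (PySem.Chars.splitOn cs "/".toList) (-1)).getD []) "_test.py".toList then true
       else false)
    = (if PySem.Chars.isIn "/tests/".toList ("/".toList ++ PySem.Chars.slice cs none (some (PySem.Chars.rfind cs "/".toList + 1)))
          || PySem.Chars.isIn "/testing/".toList ("/".toList ++ PySem.Chars.slice cs none (some (PySem.Chars.rfind cs "/".toList + 1)))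
          || PySem.Chars.isIn "/test/".toList ("/".toList ++ PySem.Chars.slice cs none (some (PySem.Chars.rfind cs "/".toList + 1))) then true
       else
         PySem.Chars.startswith (PySem.Chars.slice cs (some (PySem.Chars.rfind cs "/".toList + 1)) none) "test_".toList
           || PySem.Chars.endswith (PySem.Chars.slice cs (some (PySem.Chars.rfind cs "/".toList + 1)) none) "_test.py".toList) := by
  rw [show ("/".toList : List Char) = ['/'] from rfl]
  simp only [PySem.Chars.slice_eq_listSlice]
  by_cases hs : '/' ∈ cs
  · -- cs = a ++ '/' :: b with '/' ∉ b (last slash)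
    have hs' : '/' ∈ cs.reverse := List.mem_reverse.mpr hs
    have hdw : cs.reverse.dropWhile (· ≠ '/') ≠ [] := by
      intro hnil
      rw [List.dropWhile_eq_nil_iff] at hnil
      have := hnil '/' hs'
      simp at this
    obtain ⟨c, w, hw⟩ := List.exists_cons_of_ne_nil hdw
    have hc : c = '/' := by
      have := List.head_dropWhile_not (fun x => decide (x ≠ '/')) hdw
      simp only [hw, List.head_cons] at this
      simpa using this
    subst hc
    have hsplit : cs.reverse.takeWhile (· ≠ '/') ++ '/' :: w = cs.reverse := by
      rw [← hw]; exact List.takeWhile_append_dropWhile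
    have hb : '/' ∉ (cs.reverse.takeWhile (· ≠ '/')).reverse := by
      intro hm
      have := List.mem_takeWhile_imp (List.mem_reverse.mp hm)
      simp at this
    have hcs : cs = w.reverse ++ '/' :: (cs.reverse.takeWhile (· ≠ '/')).reverse := by
      conv_lhs => rw [← cs.reverse_reverse, ← hsplit]
      simp
    generalize hA : w.reverse = a at hcs
    generalize hB : (cs.reverse.takeWhile (· ≠ '/')).reverse = b at hcs hb
    rw [hcs, splitOn_eq_mySplit, mySplit_append, mySplit_no_slash b hb, rfind_last a b hb]
    have hcast : ((a.length : Int) + 1) = ((a.length + 1 : Nat) : Int) := by push_cast; ring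
    rw [hcast, PySem.List.slice_to_natCast, PySem.List.slice_from_natCast]
    have htake : (a ++ '/' :: b).take (a.length + 1) = a ++ ['/'] := by
      rw [List.take_length_add_append 1]
      rfl
    have hdrop : (a ++ '/' :: b).drop (a.length + 1) = b := by
      rw [List.drop_length_add_append 1]
      rfl
    rw [htake, hdrop]
    have hslice : PySem.List.slice (mySplit a ++ [b]) none (some (-1)) = mySplit a := by
      simp [PySem.List.slice]
    have hget : (PySem.List.pyGet? (mySplit a ++ [b]) (-1)).getD [] = b := by
      simp [PySem.List.pyGet?, PySem.List.pyIdx?]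
    rw [hslice, hget, any_three]
    have hdirs : (['/'] ++ (a ++ ['/'])) = '/' :: (a ++ ['/']) := rfl
    rw [hdirs]
    rw [show "/tests/".toList = '/' :: ("tests".toList ++ ['/']) from by decide,
        show "/testing/".toList = '/' :: ("testing".toList ++ ['/']) from by decide,
        show "/test/".toList = '/' :: ("test".toList ++ ['/']) from by decide]
    rw [isIn_eq_decide_component _ a (by decide), isIn_eq_decide_component _ a (by decide),
        isIn_eq_decide_component _ a (by decide)]
    cases h1 : decide ("tests".toList ∈ mySplit a) <;>
      cases h2 : decide ("testing".toList ∈ mySplit a) <;>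
        cases h3 : decide ("test".toList ∈ mySplit a) <;>
          simp
  · rw [splitOn_eq_mySplit, mySplit_no_slash cs hs, rfind_no_slash hs]
    have h0 : ((-1 : Int) + 1) = ((0 : Nat) : Int) := by norm_num
    rw [h0, PySem.List.slice_to_natCast, PySem.List.slice_from_natCast]
    have hslice : PySem.List.slice [cs] none (some (-1)) = ([] : List (List Char)) := by
      simp [PySem.List.slice]
    have hget : (PySem.List.pyGet? [cs] (-1)).getD [] = cs := by
      simp [PySem.List.pyGet?, PySem.List.pyIdx?]
    rw [hslice, hget]
    simp only [List.take_zero, List.drop_zero, List.append_nil, List.any_nil]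
    rw [show PySem.Chars.isIn "/tests/".toList ['/'] = false from by decide,
        show PySem.Chars.isIn "/testing/".toList ['/'] = false from by decide,
        show PySem.Chars.isIn "/test/".toList ['/'] = false from by decide]
    simp

theorem is_test_filepath_py_spec : Claim_equal_is_test_filepath_py := by
  intro filepath _
  unfold Spec_is_test_filepath_py is_test_filepath_py is_test_filepath_py_alt
  exact main_key _
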